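-- pv_equiv track=rewrite | github.com/dzthuan/Hit_Private_Python | Day5/bai2.py | solve
-- ===== SOURCE A (Python) =====
-- def solve(input, sum):
--     s = sorted(input)
--     s1 = 0
--     tmp = set()
--     for num in s:
--         if s1 + num <= sum:
--             tmp.add(num)
--             s1 += num
--         else:
--             break
--     return tmp
-- ===== SOURCE B (Python) =====
-- def solve(input, sum):
--     # Frequency-map batching: count copies of each value once, then walk the
--     # distinct values in increasing order, admitting a whole batch of equal
--     # values at a time (how many copies fit is computed by one division).
--     cnt = {}
--     for x in input:
--         cnt[x] = cnt.get(x, 0) + 1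
--     total = 0
--     out = set()
--     for v in sorted(cnt):
--         if total + v > sum:
--             break
--         out.add(v)
--         if v > 0:
--             if (sum - total) // v < cnt[v]:
--                 break
--             total += cnt[v] * v
--         elif v < 0:
--             total += cnt[v] * v
--     return out
-- ===== Notes on version B (the rewrite author's own statement) =====
-- stated objective: alternative
-- what changed: Replaces the sorted per-element scan (running sum with break) by a frequency dict built in one pass plus a loop over the sorted distinct values that admits each batch of equal values at once, deciding with a single floor division how many copies of a positive value fit; elements are never visited individually after counting.
import Mathlib
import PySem

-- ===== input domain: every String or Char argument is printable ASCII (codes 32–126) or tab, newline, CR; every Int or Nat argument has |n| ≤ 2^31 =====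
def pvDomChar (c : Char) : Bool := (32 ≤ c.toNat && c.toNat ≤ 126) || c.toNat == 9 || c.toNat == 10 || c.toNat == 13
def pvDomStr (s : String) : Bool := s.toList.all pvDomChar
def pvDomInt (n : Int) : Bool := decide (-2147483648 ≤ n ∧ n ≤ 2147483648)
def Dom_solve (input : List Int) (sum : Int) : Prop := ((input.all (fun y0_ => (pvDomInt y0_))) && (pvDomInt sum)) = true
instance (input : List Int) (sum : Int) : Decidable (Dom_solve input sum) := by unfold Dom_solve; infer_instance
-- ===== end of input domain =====

-- B replaces A's sorted per-element scan by a frequency map plus per-distinct-value batching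
-- (one division decides how many equal copies fit); same return value everywhere.

-- ===== PORT A =====
-- the for-loop with break, carrying the running sum s1 and the set tmp
def solveLoop (sum : Int) : List Int → Int → PySem.Set Int → PySem.Set Int
  | [], _, tmp => tmp
  | num :: rest, s1, tmp =>
    if s1 + num ≤ sum then solveLoop sum rest (s1 + num) (PySem.Set.add tmp num)
    else tmp

def solve (input : List Int) (sum : Int) : List Int :=
  solveLoop sum (PySem.List.sorted input (fun x => x) false) 0 PySem.Set.empty

-- ===== PORT B =====
-- the for-loop over the sorted distinct values, admitting each batch of equal values at once
def batchLoop (sum : Int) (cnt : PySem.Dict Int Int) : List Int → Int → PySem.Set Int → PySem.Set Int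
  | [], _, out => out
  | v :: rest, total, out =>
    if total + v > sum then out
    else
      -- out.add(v), then the three sign cases
      if v > 0 then
        if PySem.Int.floordiv (sum - total) v < cnt.getD v 0 then PySem.Set.add out v
        else batchLoop sum cnt rest (total + cnt.getD v 0 * v) (PySem.Set.add out v)
      else if v < 0 then batchLoop sum cnt rest (total + cnt.getD v 0 * v) (PySem.Set.add out v)
      else batchLoop sum cnt rest total (PySem.Set.add out v)

def solve_alt (input : List Int) (sum : Int) : List Int :=
  -- the cnt[x] = cnt.get(x, 0) + 1 loop, then 'for v in sorted(cnt)' over the dict's keys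
  let cnt := input.foldl (fun d x => d.insert x (d.getD x 0 + 1)) PySem.Dict.empty
  batchLoop sum cnt (PySem.List.sorted cnt.keys (fun v => v) false) 0 PySem.Set.empty

-- ===== PRECONDITION & SPEC =====
def Spec_solve (input : List Int) (sum : Int) (out : List Int) : Prop := out = solve_alt input sum
instance (input : List Int) (sum : Int) (out : List Int) : Decidable (Spec_solve input sum out) := by unfold Spec_solve; infer_instance

-- ===== CLAIM (what is proved, stated in full; the proofs are below) =====
def Claim_equal_solve : Prop := ∀ (input : List Int) (sum : Int), Dom_solve input sum → Spec_solve input sum (solve input sum)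

-- ===== LEMMAS AND PROOFS =====
theorem set_add_idem (s : PySem.Set Int) (x : Int) :
    PySem.Set.add (PySem.Set.add s x) x = PySem.Set.add s x := by
  have hx : x ∈ PySem.Set.add s x := (PySem.Set.mem_add _ _ _).2 (Or.inr rfl)
  have hc : PySem.Set.contains (PySem.Set.add s x) x = true := (PySem.Set.contains_iff _ _).2 hx
  conv_lhs => rw [show ∀ (t : PySem.Set Int) (y : Int), PySem.Set.add t y = if t.contains y then t else t ++ [y] from fun _ _ => rfl]
  rw [if_pos hc]

-- a batch of c copies of a value v ≤ 0: once the first copy fits, all of them do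
theorem solveLoop_replicate_nonpos (sum v : Int) (hv : v ≤ 0) :
    ∀ (c : Nat) (tail : List Int) (total : Int) (tmp : PySem.Set Int),
      total + v ≤ sum → 1 ≤ c →
      solveLoop sum (List.replicate c v ++ tail) total tmp
        = solveLoop sum tail (total + (c : Int) * v) (PySem.Set.add tmp v) := by
  intro c
  induction c with
  | zero => intro _ _ _ _ h; omega
  | succ k ih =>
    intro tail total tmp hfit _
    rw [List.replicate_succ, List.cons_append, solveLoop, if_pos hfit]
    by_cases hk : 1 ≤ k
    · rw [ih tail (total + v) (PySem.Set.add tmp v) (by omega) hk, set_add_idem]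
      congr 1
      push_cast
      ring
    · have hk0 : k = 0 := by omega
      subst hk0
      simp

-- a batch of c copies of a value v > 0: whether all c copies fit decides break vs continue
theorem solveLoop_replicate_pos (sum v : Int) (hv : 0 < v) :
    ∀ (c : Nat) (tail : List Int) (total : Int) (tmp : PySem.Set Int),
      total + v ≤ sum → 1 ≤ c →
      solveLoop sum (List.replicate c v ++ tail) total tmp
        = if (c : Int) * v ≤ sum - total then
            solveLoop sum tail (total + (c : Int) * v) (PySem.Set.add tmp v)
          else PySem.Set.add tmp v := by
  intro c
  induction c with
  | zero => intro _ _ _ _ h; omega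
  | succ k ih =>
    intro tail total tmp hfit _
    rw [List.replicate_succ, List.cons_append, solveLoop, if_pos hfit]
    by_cases hk : 1 ≤ k
    · by_cases h2 : total + v + v ≤ sum
      · rw [ih tail (total + v) (PySem.Set.add tmp v) h2 hk, set_add_idem]
        by_cases hcond : (k : Int) * v ≤ sum - (total + v)
        · rw [if_pos hcond, if_pos (by push_cast; nlinarith)]
          congr 1
          push_cast
          ring
        · rw [if_neg hcond, if_neg (by push_cast; intro hc; apply hcond; nlinarith)]
      · -- the second copy already fails: the scan breaks on the head of the rest of the batch
        rw [if_neg (by push_cast; nlinarith)]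
        obtain ⟨k', hk'⟩ : ∃ k', k = k' + 1 := ⟨k - 1, by omega⟩
        subst hk'
        rw [List.replicate_succ, List.cons_append, solveLoop, if_neg (by omega)]
    · have hk0 : k = 0 := by omega
      subst hk0
      rw [if_pos (by push_cast; omega)]
      simp

-- counting the elements of a flatMap of per-value batches
theorem count_flatMap_replicate (input : List Int) (x : Int) :
    ∀ (vals : List Int), vals.Nodup →
      (vals.flatMap (fun v => List.replicate (input.count v) v)).count x
        = if x ∈ vals then input.count x else 0 := by
  intro vals
  induction vals with
  | nil => intro _; simp
  | cons v rest ih =>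
    intro hnd
    rw [List.nodup_cons] at hnd
    rw [List.flatMap_cons, List.count_append, ih hnd.2, List.count_replicate]
    by_cases hx : x = v
    · subst hx
      simp [hnd.1]
    · simp [hx, Ne.symm hx]

-- the flattened batches are nondecreasing when the distinct values are strictly increasing
theorem pairwise_flatMap_replicate (input : List Int) :
    ∀ (vals : List Int), vals.Pairwise (· < ·) →
      (vals.flatMap (fun v => List.replicate (input.count v) v)).Pairwise (· ≤ ·) := by
  intro vals
  induction vals with
  | nil => intro _; simp
  | cons v rest ih =>
    intro hpw
    rw [List.pairwise_cons] at hpw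
    rw [List.flatMap_cons, List.pairwise_append]
    refine ⟨List.pairwise_replicate.2 (Or.inr le_rfl), ih hpw.2, ?_⟩
    intro a ha b hb
    rw [List.eq_of_mem_replicate ha]
    obtain ⟨w, hw, hbw⟩ := List.mem_flatMap.1 hb
    rw [List.eq_of_mem_replicate hbw]
    exact le_of_lt (hpw.1 w hw)

-- the sorted list is the concatenation of its equal-value batches, by increasing value
theorem sorted_eq_flatMap_batches (input : List Int) :
    PySem.List.sorted input (fun x => x) false
      = (PySem.List.sorted (PySem.Set.ofList input) (fun x => x) false).flatMap
          (fun v => List.replicate (input.count v) v) := by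
  have hvals_nodup : (PySem.List.sorted (PySem.Set.ofList input) (fun x => x) false).Nodup :=
    (PySem.List.sorted_perm _ _ _).nodup_iff.2 (PySem.Set.nodup_ofList input)
  have hvals_mem : ∀ x, x ∈ PySem.List.sorted (PySem.Set.ofList input) (fun x => x) false ↔ x ∈ input := by
    intro x
    rw [PySem.List.mem_sorted, PySem.Set.mem_ofList]
  apply PySem.List.sorted_id_eq_of_perm_of_pairwise
  · rw [List.perm_iff_count]
    intro x
    rw [count_flatMap_replicate input x _ hvals_nodup]
    by_cases hx : x ∈ input
    · simp [(hvals_mem x).2 hx]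
    · simp [List.count_eq_zero_of_not_mem hx]
  · exact pairwise_flatMap_replicate input _ (PySem.List.sorted_ofList_pairwise_lt input)

-- the batching loop computes exactly A's per-element scan over the expanded batches
theorem batchLoop_eq (sum : Int) (input : List Int) :
    ∀ (vals : List Int), vals.Pairwise (· < ·) → (∀ v ∈ vals, v ∈ input) →
    ∀ (total : Int) (out : PySem.Set Int),
    batchLoop sum (PySem.Dict.counter input) vals total out
      = solveLoop sum (vals.flatMap (fun v => List.replicate (input.count v) v)) total out := by
  intro vals
  induction vals with
  | nil => intro _ _ _ _; rfl
  | cons v rest ih =>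
    intro hpw hmem total out
    rw [List.pairwise_cons] at hpw
    have hc1 : 1 ≤ input.count v := List.count_pos_iff.2 (hmem v (by simp))
    have hgetD : (PySem.Dict.counter input).getD v 0 = (input.count v : Int) :=
      PySem.Dict.getD_counter input v
    rw [List.flatMap_cons, batchLoop]
    by_cases hbrk : total + v > sum
    · rw [if_pos hbrk]
      obtain ⟨k', hk'⟩ : ∃ k', input.count v = k' + 1 := ⟨input.count v - 1, by omega⟩
      rw [hk', List.replicate_succ, List.cons_append, solveLoop, if_neg (by omega)]
    · rw [if_neg hbrk]
      have hfit : total + v ≤ sum := by omega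
      by_cases hpos : v > 0
      · rw [if_pos hpos,
          solveLoop_replicate_pos sum v hpos (input.count v) _ total out hfit hc1, hgetD]
        by_cases hdiv : PySem.Int.floordiv (sum - total) v < (input.count v : Int)
        · rw [if_pos hdiv, if_neg ?_]
          intro hle
          exact absurd ((PySem.Int.le_floordiv_iff_mul_le (a := sum - total) hpos).2 hle) (by omega)
        · rw [if_neg hdiv,
            if_pos ((PySem.Int.le_floordiv_iff_mul_le (a := sum - total) hpos).1 (by omega)),
            ih hpw.2 (fun w hw => hmem w (by simp [hw])) _ _]
      · rw [if_neg hpos,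
          solveLoop_replicate_nonpos sum v (by omega) (input.count v) _ total out hfit hc1]
        by_cases hneg : v < 0
        · rw [if_pos hneg, hgetD, ih hpw.2 (fun w hw => hmem w (by simp [hw])) _ _]
        · have hv0 : v = 0 := by omega
          rw [if_neg hneg, ih hpw.2 (fun w hw => hmem w (by simp [hw])) _ _]
          subst hv0
          norm_num

-- ===== VERDICT (by name: the statement is the Claim_ definition above) =====
theorem solve_spec : Claim_equal_solve := by
  intro input sum _
  unfold Spec_solve solve solve_alt
  show solveLoop sum (PySem.List.sorted input (fun x => x) false) 0 PySem.Set.empty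
      = batchLoop sum _ (PySem.List.sorted (PySem.Dict.keys _) (fun v => v) false) 0 PySem.Set.empty
  rw [PySem.Dict.foldl_insert_getD_add_one_eq_counter, PySem.Dict.keys_counter]
  rw [batchLoop_eq sum input _ (PySem.List.sorted_ofList_pairwise_lt input)
    (fun w hw => (PySem.Set.mem_ofList _ _).1 ((PySem.List.mem_sorted _ _ _ _).1 hw))]
  rw [sorted_eq_flatMap_batches]
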